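-- pv_equiv track=rewrite | github.com/mayankmanipant/Problem-Solving-DSA | CF_116A_Tram.py | tram_capacity
-- ===== SOURCE A (Python) =====
-- def tram_capacity(n, stops):
--     current_capacity = 0
--     max_capacity = 0
--
--     for stop in stops:
--         exits, enters = stop
--         current_capacity = current_capacity - exits + enters
--         max_capacity = max(max_capacity, current_capacity)
--
--     return max_capacity
-- ===== SOURCE B (Python) =====
-- def tram_capacity(n, stops):
--     # Back-to-front dynamic programming on the suffix recurrence
--     # best(suffix) = max(0, delta + best(rest)); no running capacity or running max.
--     best = 0
--     for exits, enters in reversed(stops):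
--         best = max(0, enters - exits + best)
--     return best
-- ===== Notes on version B (the rewrite author's own statement) =====
-- stated objective: alternative
-- what changed: Replaces the forward fused scan (running capacity + running max) by a back-to-front dynamic program over the suffix recurrence best = max(0, delta + best), maintaining a single state and no running sum.
import Mathlib
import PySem

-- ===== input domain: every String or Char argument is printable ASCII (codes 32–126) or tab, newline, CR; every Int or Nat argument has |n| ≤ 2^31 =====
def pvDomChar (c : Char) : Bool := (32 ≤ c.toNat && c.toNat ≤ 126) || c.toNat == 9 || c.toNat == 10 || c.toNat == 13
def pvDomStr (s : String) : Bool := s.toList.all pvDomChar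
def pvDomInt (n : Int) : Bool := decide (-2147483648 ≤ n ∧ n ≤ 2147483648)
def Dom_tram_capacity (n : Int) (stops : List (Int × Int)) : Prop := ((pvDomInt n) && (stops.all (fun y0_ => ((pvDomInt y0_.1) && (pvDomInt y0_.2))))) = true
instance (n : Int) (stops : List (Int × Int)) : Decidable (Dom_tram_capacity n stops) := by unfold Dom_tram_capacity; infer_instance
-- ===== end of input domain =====

-- B replaces A's forward scan (running capacity + running max) by a back-to-front
-- dynamic program best = max(0, delta + best); same O(n) cost, different decomposition.

-- ===== PORT A =====
-- forward loop over stops carrying (current_capacity, max_capacity)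
def tram_capacity (n : Int) (stops : List (Int × Int)) : Int :=
  (stops.foldl
    (fun (s : Int × Int) (stop : Int × Int) =>
      let current_capacity := s.1 - stop.1 + stop.2
      (current_capacity, max s.2 current_capacity))
    (0, 0)).2

-- ===== PORT B =====
-- loop over reversed(stops) carrying the single DP state `best`
def tram_capacity_alt (n : Int) (stops : List (Int × Int)) : Int :=
  (stops.reverse).foldl (fun best (stop : Int × Int) => max 0 (stop.2 - stop.1 + best)) 0

-- ===== PRECONDITION & SPEC =====
def Spec_tram_capacity (n : Int) (stops : List (Int × Int)) (out : Int) : Prop := out = tram_capacity_alt n stops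
instance (n : Int) (stops : List (Int × Int)) (out : Int) : Decidable (Spec_tram_capacity n stops out) := by unfold Spec_tram_capacity; infer_instance

-- ===== CLAIM (what is proved, stated in full; the proofs are below) =====
def Claim_equal_tram_capacity : Prop := ∀ (n : Int) (stops : List (Int × Int)), Dom_tram_capacity n stops → Spec_tram_capacity n stops (tram_capacity n stops)

-- ===== LEMMAS AND PROOFS =====

-- B as a structural recursion (foldr form of the reversed foldl)
def tcGo : List (Int × Int) → Int
  | [] => 0
  | stop :: rest => max 0 (stop.2 - stop.1 + tcGo rest)

theorem tcGo_nonneg (l : List (Int × Int)) : 0 ≤ tcGo l := by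
  cases l with
  | nil => simp [tcGo]
  | cons s r => simp [tcGo]

theorem alt_eq_tcGo (n : Int) (stops : List (Int × Int)) :
    tram_capacity_alt n stops = tcGo stops := by
  unfold tram_capacity_alt
  rw [List.foldl_reverse]
  induction stops with
  | nil => rfl
  | cons s r ih => simp [tcGo, ih]

theorem loop_eq (stops : List (Int × Int)) :
    ∀ c m : Int, c ≤ m →
      (stops.foldl
        (fun (s : Int × Int) (stop : Int × Int) =>
          let current_capacity := s.1 - stop.1 + stop.2
          (current_capacity, max s.2 current_capacity))
        (c, m)).2 = max m (c + tcGo stops) := by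
  induction stops with
  | nil => intro c m h; simp [tcGo]; omega
  | cons s r ih =>
    intro c m h
    simp only [List.foldl_cons, tcGo]
    rw [ih (c - s.1 + s.2) (max m (c - s.1 + s.2)) (le_max_right _ _)]
    have hg := tcGo_nonneg r
    omega

-- ===== VERDICT (by name: the statement is the Claim_ definition above) =====
theorem tram_capacity_spec : Claim_equal_tram_capacity := by
  intro n stops _
  unfold Spec_tram_capacity
  rw [alt_eq_tcGo]
  unfold tram_capacity
  rw [loop_eq stops 0 0 le_rfl]
  have := tcGo_nonneg stops
  omega
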